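-- pv_equiv track=rewrite | github.com/AyushSaini00/advent-of-code-2025 | day-6/python/part_2.py | part_2
-- ===== SOURCE A (Python) =====
-- def part_2(lines):
--     grid = []
--     for line in lines:
--         grid.append(list(line))
--
--     columns = len(grid[0])
--     str = ""
--     for col_idx in range(columns - 1, -1, -1):
--         for row in grid:
--             str += row[col_idx]
--
--
--     curr_num = ""
--     curr_nums = []
--     curr_operator = None
--     groups = []
--     for ch in str:
--         if ch.isdigit():
--             curr_num += ch
--         else:
--             if curr_num:
--                 curr_nums.append(int(curr_num))
--                 curr_num = ""
--             if ch in ["+", "*"]: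
--                 curr_operator = ch
--                 groups.append((curr_operator, curr_nums))
--                 curr_nums = []
--
--     grand_total = 0
--     for operator, nums in groups:
--          if operator == "+":
--             val = 0
--             for n in nums:
--                 val += n
--          elif operator == "*":
--             val = 1
--             for n in nums:
--                 val *= n
--
--          grand_total += val
--
--     return grand_total
-- ===== SOURCE B (Python) =====
-- def _nums(seg):
--     # ints of the maximal digit runs of seg
--     out = []
--     cur = ""
--     for ch in seg:
--         if ch.isdigit():
--             cur += ch
--         else:
--             if cur:
--                 out.append(int(cur))
--             cur = ""
--     if cur:
--         out.append(int(cur))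
--     return out
--
-- def part_2(lines):
--     cols = len(lines[0])
--     s = "".join(line[c] for c in range(cols - 1, -1, -1) for line in lines)
--     total = 0
--     start = 0
--     for i, ch in enumerate(s):
--         if ch == "+" or ch == "*":
--             nums = _nums(s[start:i])
--             if ch == "+":
--                 val = 0
--                 for n in nums:
--                     val += n
--             else:
--                 val = 1
--                 for n in nums:
--                     val *= n
--             total += val
--             start = i + 1
--     return total
-- ===== Notes on version B (the rewrite author's own statement) =====
-- stated objective: alternative
-- what changed: A's single streaming state machine (curr_num/curr_nums/operator accumulators building a groups list, aggregated by a second pass) is replaced by index-based segmentation: one enumerate pass locates each operator, slices out the segment since the previous operator, re-parses its digit runs, and adds the group's sum/product to the total directly, with no groups list and no operator state.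
import Mathlib
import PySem

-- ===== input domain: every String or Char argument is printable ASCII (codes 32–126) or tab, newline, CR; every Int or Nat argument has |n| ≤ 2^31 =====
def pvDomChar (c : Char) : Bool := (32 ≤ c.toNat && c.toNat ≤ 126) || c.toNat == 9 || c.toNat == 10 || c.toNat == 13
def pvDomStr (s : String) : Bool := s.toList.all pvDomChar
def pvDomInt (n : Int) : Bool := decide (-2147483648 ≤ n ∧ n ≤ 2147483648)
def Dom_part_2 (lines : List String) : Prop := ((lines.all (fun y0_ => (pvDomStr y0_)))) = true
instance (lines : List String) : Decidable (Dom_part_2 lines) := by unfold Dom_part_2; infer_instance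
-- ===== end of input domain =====

-- B replaces A's streaming operator/number state machine (which builds a groups list and
-- aggregates it in a second pass) by index-based segmentation: one enumerate pass finds the
-- operators, each preceding segment is sliced out and re-parsed, totals accumulate directly.
-- Objective: alternative decomposition (not claimed faster).

-- ===== PORT A =====
-- A's per-character state machine: state = (curr_num, curr_nums, groups)
def pvScanA (st : List Char × List Int × List (Char × List Int)) (ch : Char) :
    List Char × List Int × List (Char × List Int) :=
  if PySem.Chars.isdigit ch then (st.1 ++ [ch], st.2.1, st.2.2)
  else
    let nums := if st.1 ≠ [] then st.2.1 ++ [(PySem.Int.ofChars? st.1).getD 0] else st.2.1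
    if ch = '+' ∨ ch = '*' then ([], [], st.2.2 ++ [(ch, nums)])
    else ([], nums, st.2.2)

-- A's aggregation loop; the second component carries Python's leftover `val` variable
def pvAggA (p : Int × Int) (g : Char × List Int) : Int × Int :=
  let val := if g.1 = '+' then g.2.foldl (· + ·) 0
             else if g.1 = '*' then g.2.foldl (· * ·) 1
             else p.2
  (p.1 + val, val)

def part_2 (lines : List String) : Int :=
  let grid : List (List Char) := lines.foldl (fun g line => g ++ [line.toList]) []
  let columns : Int := (((PySem.List.pyGet? grid 0).getD []).length : Int)
  let s : List Char := (PySem.List.pyRange (columns - 1) (-1) (-1)).foldl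
    (fun acc colIdx => grid.foldl
      (fun acc row => acc ++ [(PySem.List.pyGet? row colIdx).getD ' ']) acc) []
  let fin := s.foldl pvScanA ([], [], [])
  (fin.2.2.foldl pvAggA (0, 0)).1

-- ===== PORT B =====
-- ints of the maximal digit runs of seg (Source B's _nums); state = (out, cur)
def pvStepN (p : List Int × List Char) (ch : Char) : List Int × List Char :=
  if PySem.Chars.isdigit ch then (p.1, p.2 ++ [ch])
  else (if p.2 ≠ [] then p.1 ++ [(PySem.Int.ofChars? p.2).getD 0] else p.1, [])

def pvNums (seg : List Char) : List Int :=
  let p := seg.foldl pvStepN ([], [])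
  if p.2 ≠ [] then p.1 ++ [(PySem.Int.ofChars? p.2).getD 0] else p.1

-- B's loop body over enumerate(s): state = (total, start)
def pvStepB (s : List Char) (p : Int × Int) (ic : Int × Char) : Int × Int :=
  if ic.2 = '+' ∨ ic.2 = '*' then
    let nums := pvNums (PySem.List.slice s (some p.2) (some ic.1))
    let val := if ic.2 = '+' then nums.foldl (· + ·) 0 else nums.foldl (· * ·) 1
    (p.1 + val, ic.1 + 1)
  else p

def part_2_alt (lines : List String) : Int :=
  let cols : Int := PySem.Str.len ((PySem.List.pyGet? lines 0).getD "")
  let s : List Char := (PySem.List.pyRange (cols - 1) (-1) (-1)).foldl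
    (fun acc c => lines.foldl
      (fun acc line => acc ++ [(PySem.Str.pyGet? line c).getD ' ']) acc) []
  ((PySem.List.enumerate s 0).foldl (pvStepB s) (0, 0)).1

-- ===== PRECONDITION & SPEC =====
-- Pre_ excludes exactly the inputs where the Python A raises IndexError (the empty list of
-- lines, and a line shorter than the first line); B raises IndexError there too.
def Pre_part_2 (lines : List String) : Prop :=
  lines ≠ [] ∧ ∀ l ∈ lines, (lines.headD "").toList.length ≤ l.toList.length
instance (lines : List String) : Decidable (Pre_part_2 lines) := by unfold Pre_part_2; infer_instance
def pvWitness_part_2 : List String := ["1+", "2*"]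

def Spec_part_2 (lines : List String) (out : Int) : Prop := out = part_2_alt lines
instance (lines : List String) (out : Int) : Decidable (Spec_part_2 lines out) := by unfold Spec_part_2; infer_instance

-- ===== CLAIM (what is proved, stated in full; the proofs are below) =====
def Claim_equal_part_2 : Prop := ∀ (lines : List String), Dom_part_2 lines → Pre_part_2 lines → Spec_part_2 lines (part_2 lines)

-- ===== LEMMAS AND PROOFS =====

-- the common segment-carrying fold: state = (total, chars since the last operator)
def pvStepC (p : Int × List Char) (ch : Char) : Int × List Char :=
  if ch = '+' ∨ ch = '*' then
    (p.1 + (if ch = '+' then (pvNums p.2).foldl (· + ·) 0 else (pvNums p.2).foldl (· * ·) 1), [])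
  else (p.1, p.2 ++ [ch])

theorem isdigit_ne_ops {ch : Char} (h : PySem.Chars.isdigit ch = true) :
    ¬ (ch = '+' ∨ ch = '*') := by
  rintro (rfl | rfl) <;> simp [PySem.Chars.isdigit] at h

-- B's slice-based fold over enumerate equals the segment-carrying fold
theorem B_eq_C (suf : List Char) : ∀ (pre : List Char) (total : Int) (start : Nat),
    start ≤ pre.length →
    ((PySem.List.enumerate suf (pre.length : Int)).foldl (pvStepB (pre ++ suf))
        (total, (start : Int))).1
      = (suf.foldl pvStepC (total, pre.drop start)).1 := by
  induction suf with
  | nil => intro pre total start _; simp [PySem.List.enumerate]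
  | cons ch rest ih =>
    intro pre total start hs
    rw [PySem.List.enumerate_cons, List.foldl_cons, List.foldl_cons]
    by_cases hop : ch = '+' ∨ ch = '*'
    · have hslice : PySem.List.slice (pre ++ ch :: rest) (some (start : Int))
          (some (pre.length : Int)) = pre.drop start := by
        rw [PySem.List.slice_natCast, List.drop_append_of_le_length hs,
          List.take_left' (by simp)]
      have hstep : pvStepB (pre ++ ch :: rest) (total, (start : Int)) ((pre.length : Int), ch)
          = (total + (if ch = '+' then (pvNums (pre.drop start)).foldl (· + ·) 0
              else (pvNums (pre.drop start)).foldl (· * ·) 1), (pre.length : Int) + 1) := by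
        simp only [pvStepB, hslice, if_pos hop]
      rw [hstep]
      have hcast : ((pre.length : Int) + 1) = (((pre ++ [ch]).length : Nat) : Int) := by
        simp
      have hre : pre ++ ch :: rest = (pre ++ [ch]) ++ rest := by simp
      rw [hcast, hre]
      have := ih (pre ++ [ch])
        (total + (if ch = '+' then (pvNums (pre.drop start)).foldl (· + ·) 0
              else (pvNums (pre.drop start)).foldl (· * ·) 1))
        ((pre ++ [ch]).length) (le_refl _)
      rw [show (((pre ++ [ch]).length : Nat) : Int) = (((pre ++ [ch]).length : Nat) : Int) from rfl] at this
      rw [this, List.drop_length]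
      simp [pvStepC, hop]
    · have hstep : pvStepB (pre ++ ch :: rest) (total, (start : Int)) ((pre.length : Int), ch)
          = (total, (start : Int)) := by simp [pvStepB, hop]
      rw [hstep]
      have hcast : ((pre.length : Int) + 1) = (((pre ++ [ch]).length : Nat) : Int) := by simp
      have hre : pre ++ ch :: rest = (pre ++ [ch]) ++ rest := by simp
      rw [hcast, hre, ih (pre ++ [ch]) total start (by simp; omega),
        List.drop_append_of_le_length hs]
      simp [pvStepC, hop]

-- A's scan-then-aggregate equals the segment-carrying fold
theorem A_eq_C (s : List Char) : ∀ (num : List Char) (nums : List Int)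
    (groups : List (Char × List Int)) (total : Int) (seg : List Char),
    seg.foldl pvStepN ([], []) = (nums, num) →
    (groups.foldl pvAggA (0, 0)).1 = total →
    ((s.foldl pvScanA (num, nums, groups)).2.2.foldl pvAggA (0, 0)).1
      = (s.foldl pvStepC (total, seg)).1 := by
  induction s with
  | nil => intro num nums groups total seg _ htot; simpa using htot
  | cons ch rest ih =>
    intro num nums groups total seg hseg htot
    rw [List.foldl_cons, List.foldl_cons]
    by_cases hd : PySem.Chars.isdigit ch = true
    · have hop := isdigit_ne_ops hd
      have h1 : pvScanA (num, nums, groups) ch = (num ++ [ch], nums, groups) := by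
        simp [pvScanA, hd]
      have h2 : pvStepC (total, seg) ch = (total, seg ++ [ch]) := by
        simp [pvStepC, hop]
      rw [h1, h2]
      exact ih (num ++ [ch]) nums groups total (seg ++ [ch])
        (by rw [List.foldl_append, hseg]; simp [pvStepN, hd]) htot
    · have hnums' : pvNums seg = (if num ≠ [] then nums ++ [(PySem.Int.ofChars? num).getD 0]
          else nums) := by
        simp only [pvNums, hseg]
      by_cases hop : ch = '+' ∨ ch = '*'
      · have h1 : pvScanA (num, nums, groups) ch
            = ([], [], groups ++ [(ch, if num ≠ [] then
                nums ++ [(PySem.Int.ofChars? num).getD 0] else nums)]) := by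
          simp [pvScanA, hd, hop]
        have h2 : pvStepC (total, seg) ch
            = (total + (if ch = '+' then (pvNums seg).foldl (· + ·) 0
                else (pvNums seg).foldl (· * ·) 1), []) := by
          simp [pvStepC, hop]
        rw [h1, h2]
        apply ih [] [] _ _ [] rfl
        rw [List.foldl_append, hnums']
        rcases hop with rfl | rfl
        · simp [pvAggA, htot]
        · simp [pvAggA, htot]
      · have h1 : pvScanA (num, nums, groups) ch
            = ([], (if num ≠ [] then nums ++ [(PySem.Int.ofChars? num).getD 0] else nums),
               groups) := by
          simp [pvScanA, hd, hop]
        have h2 : pvStepC (total, seg) ch = (total, seg ++ [ch]) := by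
          simp [pvStepC, hop]
        rw [h1, h2]
        exact ih [] _ groups total (seg ++ [ch])
          (by rw [List.foldl_append, hseg]; simp [pvStepN, hd]) htot

-- the two ports build the same scan string
theorem grid_eq (lines : List String) :
    lines.foldl (fun g line => g ++ [line.toList]) [] = lines.map String.toList := by
  simpa using PySem.List.foldl_append_singleton_eq_map String.toList lines []

theorem cols_eq (lines : List String) :
    (((PySem.List.pyGet? (lines.map String.toList) 0).getD []).length : Int)
      = PySem.Str.len ((PySem.List.pyGet? lines 0).getD "") := by
  cases lines <;> simp [PySem.List.pyGet?_zero, PySem.Str.len]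

theorem s_eq (lines : List String) (r : List Int) :
    r.foldl (fun acc colIdx => (lines.map String.toList).foldl
        (fun acc row => acc ++ [(PySem.List.pyGet? row colIdx).getD ' ']) acc) []
      = r.foldl (fun acc c => lines.foldl
        (fun acc line => acc ++ [(PySem.Str.pyGet? line c).getD ' ']) acc) [] := by
  have h : (fun (acc : List Char) (colIdx : Int) => (lines.map String.toList).foldl
        (fun acc row => acc ++ [(PySem.List.pyGet? row colIdx).getD ' ']) acc)
      = fun acc c => lines.foldl
        (fun acc line => acc ++ [(PySem.Str.pyGet? line c).getD ' ']) acc := by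
    funext acc c
    rw [List.foldl_map]
    rfl
  rw [h]

-- ===== VERDICT (by name: the statement is the Claim_ definition above) =====
theorem part_2_spec : Claim_equal_part_2 := by
  intro lines _ _
  unfold Spec_part_2
  simp only [part_2, part_2_alt]
  rw [grid_eq, cols_eq, s_eq]
  set s := (PySem.List.pyRange (PySem.Str.len ((PySem.List.pyGet? lines 0).getD "") - 1)
      (-1) (-1)).foldl (fun acc c => lines.foldl
      (fun acc line => acc ++ [(PySem.Str.pyGet? line c).getD ' ']) acc) [] with hs
  have hA := A_eq_C s [] [] [] 0 [] rfl rfl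
  have hB := B_eq_C s [] 0 0 (by simp)
  simp only [List.nil_append, List.drop_nil, List.length_nil, Int.natCast_zero] at hB
  rw [hA, ← hB]
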